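-- pv_equiv track=rewrite | github.com/haomingbai/bsrvcore | scripts/benchmark_body_matrix.py | parse_csv_numbers
-- ===== SOURCE A (Python) =====
-- def parse_csv_numbers(raw: str) -> list[int]:
--     values = set()
--     for token in raw.split(","):
--         token = token.strip()
--         if not token:
--             continue
--         values.add(max(0, int(token)))
--     return sorted(values)
-- ===== SOURCE B (Python) =====
-- def parse_csv_numbers(raw: str) -> list[int]:
--     out = []
--     for token in raw.split(","):
--         token = token.strip()
--         if not token:
--             continue
--         v = max(0, int(token))
--         i = 0
--         while i < len(out) and out[i] < v:
--             i += 1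
--         if i == len(out) or out[i] != v:
--             out.insert(i, v)
--     return out
-- ===== Notes on version B (the rewrite author's own statement) =====
-- stated objective: alternative
-- what changed: B never builds a set and never calls sort: it maintains the result as a sorted duplicate-free list throughout, inserting each clamped value at its ordered position (found by a linear scan) and skipping it when already present, instead of A's hash-set accumulation followed by sorted().
import Mathlib
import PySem

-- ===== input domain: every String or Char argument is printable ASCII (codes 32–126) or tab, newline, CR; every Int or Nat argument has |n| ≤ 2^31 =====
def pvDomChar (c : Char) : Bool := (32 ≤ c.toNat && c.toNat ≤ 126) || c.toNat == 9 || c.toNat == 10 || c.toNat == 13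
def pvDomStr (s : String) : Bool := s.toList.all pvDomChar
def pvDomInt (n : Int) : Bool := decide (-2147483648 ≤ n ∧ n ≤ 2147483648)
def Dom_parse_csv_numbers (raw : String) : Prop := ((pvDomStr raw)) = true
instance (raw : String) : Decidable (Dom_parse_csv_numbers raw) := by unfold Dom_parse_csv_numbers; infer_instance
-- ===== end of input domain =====

-- B never builds a set and never sorts: it keeps the result sorted and duplicate-free at all
-- times, inserting each clamped value at its ordered position found by a linear scan
-- (objective: alternative algorithm, online ordered insertion instead of set-then-sort).

-- ===== PORT A =====
def parse_csv_numbers (raw : String) : List Int :=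
  let values : PySem.Set Int :=
    (PySem.Chars.splitOn raw.toList [',']).foldl
      (fun (values : PySem.Set Int) token =>
        let token := PySem.Chars.strip token
        if token = [] then values
        else PySem.Set.add values (max 0 ((PySem.Int.ofChars? token).getD 0)))
      PySem.Set.empty
  PySem.List.sorted values (fun x => x) false

-- ===== PORT B =====
-- the while loop 'i = 0; while i < len(out) and out[i] < v: i += 1' as a structural scan
def pvScan : List Int → Int → Nat
  | [], _ => 0
  | x :: rest, v => if x < v then pvScan rest v + 1 else 0

def parse_csv_numbers_alt (raw : String) : List Int :=
  (PySem.Chars.splitOn raw.toList [',']).foldl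
    (fun (out : List Int) token =>
      let token := PySem.Chars.strip token
      if token = [] then out
      else
        let v := max 0 ((PySem.Int.ofChars? token).getD 0)
        let i := pvScan out v
        if i = out.length ∨ ¬ (PySem.List.pyGet? out (i : Int) = some v)
        then PySem.List.insert out (i : Int) v else out)
    []

-- ===== PRECONDITION & SPEC =====
-- Pre_ excludes exactly the inputs on which Python's int(token) raises ValueError
-- (a non-empty stripped token that is not an integer literal).
def Pre_parse_csv_numbers (raw : String) : Prop :=
  ((PySem.Chars.splitOn raw.toList [',']).all
    (fun t =>
      PySem.Chars.strip t == [] || (PySem.Int.ofChars? (PySem.Chars.strip t)).isSome)) = true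
instance (raw : String) : Decidable (Pre_parse_csv_numbers raw) := by
  unfold Pre_parse_csv_numbers; infer_instance

def pvWitness_parse_csv_numbers : String := "3, 2 ,1,2,-5, +7 ,, 0"

def Spec_parse_csv_numbers (raw : String) (out : List Int) : Prop := out = parse_csv_numbers_alt raw
instance (raw : String) (out : List Int) : Decidable (Spec_parse_csv_numbers raw out) := by
  unfold Spec_parse_csv_numbers; infer_instance

-- ===== CLAIM =====
def Claim_equal_parse_csv_numbers : Prop := ∀ (raw : String), Dom_parse_csv_numbers raw → Pre_parse_csv_numbers raw → Spec_parse_csv_numbers raw (parse_csv_numbers raw)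

-- ===== LEMMAS AND PROOFS =====

-- the clamped value of one token, if it survives the emptiness filter
def pvVal? (t : List Char) : Option Int :=
  if PySem.Chars.strip t = [] then none
  else some (max 0 ((PySem.Int.ofChars? (PySem.Chars.strip t)).getD 0))

-- structural ordered-insert; B's scan-and-insert step computes exactly this
def pvInsert : List Int → Int → List Int
  | [], v => [v]
  | x :: rest, v =>
      if v < x then v :: x :: rest
      else if v = x then x :: rest
      else x :: pvInsert rest v

theorem pvScan_le (out : List Int) (v : Int) : pvScan out v ≤ out.length := by
  induction out with
  | nil => simp [pvScan]
  | cons x rest ih =>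
      simp only [pvScan, List.length_cons]
      split <;> omega

theorem pv_step_eq (out : List Int) (v : Int) :
    (if pvScan out v = out.length ∨ ¬ (PySem.List.pyGet? out ((pvScan out v : Nat) : Int) = some v)
     then PySem.List.insert out ((pvScan out v : Nat) : Int) v else out) = pvInsert out v := by
  induction out with
  | nil => simp [pvScan, pvInsert, PySem.List.insert_zero]
  | cons x rest ih =>
      by_cases hx : x < v
      · have hscan : pvScan (x :: rest) v = pvScan rest v + 1 := by simp [pvScan, hx]
        have hj := pvScan_le rest v
        have hcast : ((pvScan rest v + 1 : Nat) : Int) = ((pvScan rest v : Nat) : Int) + 1 := by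
          push_cast; ring
        have hget : PySem.List.pyGet? (x :: rest) ((pvScan rest v + 1 : Nat) : Int)
            = PySem.List.pyGet? rest ((pvScan rest v : Nat) : Int) := by
          rw [hcast, PySem.List.pyGet?_cons_succ]
        have hins : PySem.List.insert (x :: rest) ((pvScan rest v + 1 : Nat) : Int) v
            = x :: PySem.List.insert rest ((pvScan rest v : Nat) : Int) v := by
          rw [PySem.List.insert_natCast _ _ _ (by simpa using Nat.succ_le_succ hj),
              PySem.List.insert_natCast _ _ _ hj]
          simp
        have hv1 : ¬ v < x := by omega
        have hv2 : ¬ v = x := by omega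
        rw [hscan]
        simp only [hget, hins, List.length_cons, pvInsert, if_neg hv1, if_neg hv2,
          Nat.add_right_cancel_iff]
        split
        · rw [← ih]; rw [if_pos ‹_›]
        · rw [← ih]; rw [if_neg ‹_›]
      · have hscan : pvScan (x :: rest) v = 0 := by simp [pvScan, hx]
        by_cases hxv : v = x
        · have : ¬ (0 = (x :: rest).length ∨ ¬ (PySem.List.pyGet? (x :: rest) ((0:Nat) : Int) = some v)) := by
            simp [hxv, List.length_cons]
          rw [hscan, if_neg this, pvInsert, if_neg (by omega), if_pos hxv]
        · have hcond : (0 = (x :: rest).length ∨ ¬ (PySem.List.pyGet? (x :: rest) ((0:Nat) : Int) = some v)) := by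
            right; simp; exact fun h => hxv h.symm
          have hvx : v < x := by omega
          rw [hscan, if_pos hcond]
          have : PySem.List.insert (x :: rest) ((0:Nat) : Int) v = v :: x :: rest := by
            simp [PySem.List.insert_zero]
          rw [this, pvInsert, if_pos hvx]

theorem pv_setFold (toks : List (List Char)) (se : PySem.Set Int) :
    toks.foldl
      (fun (values : PySem.Set Int) token =>
        let token := PySem.Chars.strip token
        if token = [] then values
        else PySem.Set.add values (max 0 ((PySem.Int.ofChars? token).getD 0))) se
    = (toks.filterMap pvVal?).foldl PySem.Set.add se := by
  induction toks generalizing se with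
  | nil => rfl
  | cons t rest ih =>
      simp only [List.foldl, List.filterMap_cons, pvVal?]
      by_cases h : PySem.Chars.strip t = [] <;> simp [pvVal?, h, ih]

theorem pv_insFold (toks : List (List Char)) (acc : List Int) :
    toks.foldl
      (fun (out : List Int) token =>
        let token := PySem.Chars.strip token
        if token = [] then out
        else
          let v := max 0 ((PySem.Int.ofChars? token).getD 0)
          let i := pvScan out v
          if i = out.length ∨ ¬ (PySem.List.pyGet? out (i : Int) = some v)
          then PySem.List.insert out (i : Int) v else out) acc
    = (toks.filterMap pvVal?).foldl pvInsert acc := by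
  induction toks generalizing acc with
  | nil => rfl
  | cons t rest ih =>
      rw [List.foldl_cons, ih, List.filterMap_cons]
      by_cases h : PySem.Chars.strip t = []
      · rw [show pvVal? t = none from by simp [pvVal?, h]]
        congr 1
        simp [h]
      · rw [show pvVal? t = some (max 0 ((PySem.Int.ofChars? (PySem.Chars.strip t)).getD 0))
              from by simp [pvVal?, h]]
        rw [List.foldl_cons]
        congr 1
        show (if PySem.Chars.strip t = [] then acc
              else
                let v := max 0 ((PySem.Int.ofChars? (PySem.Chars.strip t)).getD 0)
                let i := pvScan acc v
                if i = acc.length ∨ ¬ (PySem.List.pyGet? acc (i : Int) = some v)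
                then PySem.List.insert acc (i : Int) v else acc) = _
        rw [if_neg h]
        exact pv_step_eq acc _

theorem pvInsert_mem (out : List Int) (v x : Int) :
    x ∈ pvInsert out v ↔ x ∈ out ∨ x = v := by
  induction out with
  | nil => simp [pvInsert]
  | cons y rest ih =>
      simp only [pvInsert]
      split_ifs with h1 h2
      · simp only [List.mem_cons]; tauto
      · subst h2; simp only [List.mem_cons]; tauto
      · simp only [List.mem_cons, ih]; tauto

theorem pvInsert_pairwise (out : List Int) (v : Int)
    (h : out.Pairwise (· < ·)) : (pvInsert out v).Pairwise (· < ·) := by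
  induction out with
  | nil => simp [pvInsert]
  | cons y rest ih =>
      rcases List.pairwise_cons.mp h with ⟨hy, hrest⟩
      simp only [pvInsert]
      split_ifs with h1 h2
      · exact List.pairwise_cons.mpr ⟨by
          intro b hb
          rcases List.mem_cons.mp hb with rfl | hb
          · exact h1
          · exact lt_trans h1 (hy b hb), h⟩
      · exact h
      · refine List.pairwise_cons.mpr ⟨?_, ih hrest⟩
        intro b hb
        rcases (pvInsert_mem rest v b).mp hb with hb | rfl
        · exact hy b hb
        · omega

theorem pv_foldInsert (vals : List Int) (acc : List Int)
    (h : acc.Pairwise (· < ·)) :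
    (vals.foldl pvInsert acc).Pairwise (· < ·) ∧
      (∀ x, x ∈ vals.foldl pvInsert acc ↔ x ∈ acc ∨ x ∈ vals) := by
  induction vals generalizing acc with
  | nil => simp [h]
  | cons v rest ih =>
      obtain ⟨hp, hm⟩ := ih (pvInsert acc v) (pvInsert_pairwise acc v h)
      refine ⟨hp, ?_⟩
      intro x
      rw [List.foldl_cons, hm x, pvInsert_mem]
      simp; tauto

theorem pv_main (vals : List Int) :
    vals.foldl pvInsert [] = PySem.List.sorted (PySem.Set.ofList vals) (fun x => x) false := by
  obtain ⟨hp, hm⟩ := pv_foldInsert vals [] (by simp)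
  symm
  apply PySem.List.sorted_eq_of_perm_of_pairwise_lt
  · rw [List.perm_ext_iff_of_nodup (hp.imp ne_of_lt) (PySem.Set.nodup_ofList vals)]
    intro a
    rw [hm a, PySem.Set.mem_ofList]
    simp
  · exact hp

-- ===== VERDICT =====
theorem parse_csv_numbers_spec : Claim_equal_parse_csv_numbers := by
  intro raw _ _
  unfold Spec_parse_csv_numbers parse_csv_numbers parse_csv_numbers_alt
  rw [pv_setFold, pv_insFold, pv_main]
  rfl
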